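-- pv_equiv track=rewrite | github.com/elmsdev-ph/bom-automations | product_product.py | _get_teeth_for_diameter
-- ===== SOURCE A (Python) =====
-- def _get_teeth_for_diameter(dia, teeth_type, teeth_data):
--     if dia in teeth_data:
--         return teeth_data[dia].get(teeth_type, 0)
--
--     # Initialize closest_diameter to handle cases where dia is smaller than any key
--     closest_diameter = None
--     sorted_diameters = sorted(teeth_data.keys())
--
--     for d in sorted_diameters:
--         if dia < d:
--             break
--         closest_diameter = d
--
--     # If closest_diameter is still None, dia is smaller than the smallest key in teeth_data
--     if closest_diameter is None:
--         closest_diameter = sorted_diameters[0]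
--
--     return teeth_data[closest_diameter].get(teeth_type, 0)
-- ===== SOURCE B (Python) =====
-- def _get_teeth_for_diameter(dia, teeth_type, teeth_data):
--     keys = sorted(teeth_data)
--     lo, hi = 0, len(keys)
--     while lo < hi:
--         mid = (lo + hi) // 2
--         if dia < keys[mid]:
--             hi = mid
--         else:
--             lo = mid + 1
--     closest = keys[lo - 1] if lo > 0 else keys[0]
--     return teeth_data[closest].get(teeth_type, 0)
-- ===== Notes on version B (the rewrite author's own statement) =====
-- stated objective: alternative
-- what changed: B replaces A's exact-key membership branch plus linear break-scan over the sorted keys by a single hand-written bisect_right binary search on the sorted keys (the scan disappears; both still sort once).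
import Mathlib
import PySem

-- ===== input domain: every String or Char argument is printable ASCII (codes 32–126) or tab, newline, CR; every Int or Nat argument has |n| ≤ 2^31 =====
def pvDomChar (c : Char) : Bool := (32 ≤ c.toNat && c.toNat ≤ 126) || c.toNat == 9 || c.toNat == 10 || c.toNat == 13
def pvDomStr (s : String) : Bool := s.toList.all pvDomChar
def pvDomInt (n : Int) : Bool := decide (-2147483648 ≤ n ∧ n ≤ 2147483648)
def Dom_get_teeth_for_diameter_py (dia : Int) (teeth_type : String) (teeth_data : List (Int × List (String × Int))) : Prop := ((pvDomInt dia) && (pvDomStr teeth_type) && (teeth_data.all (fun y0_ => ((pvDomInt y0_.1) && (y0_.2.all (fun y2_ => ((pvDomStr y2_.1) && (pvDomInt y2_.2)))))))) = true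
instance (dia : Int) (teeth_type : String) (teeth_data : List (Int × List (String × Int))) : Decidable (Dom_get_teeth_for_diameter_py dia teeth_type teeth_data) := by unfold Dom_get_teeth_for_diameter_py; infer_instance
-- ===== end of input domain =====

-- B replaces A's exact-key branch plus linear break-scan over the sorted keys by a single
-- hand-written bisect_right binary search (alternative algorithm, similar overall cost).

-- ===== PORT A =====
-- the loop 'for d in sorted_diameters: if dia < d: break; closest = d' (closest starts as None)
def pvALoop (dia : Int) : List Int → Option Int → Option Int
  | [], acc => acc
  | d :: rest, acc => if dia < d then acc else pvALoop dia rest (some d)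

def get_teeth_for_diameter_py (dia : Int) (teeth_type : String) (teeth_data : List (Int × List (String × Int))) : Int :=
  let d := PySem.Dict.mk teeth_data
  if PySem.Dict.contains d dia then
    PySem.Dict.getD (PySem.Dict.mk (PySem.Dict.getD d dia [])) teeth_type 0
  else
    let sorted_diameters := PySem.List.sorted (PySem.Dict.keys d) (fun x => x) false
    let closest : Int :=
      match pvALoop dia sorted_diameters none with
      | some c => c
      | none => (PySem.List.pyGet? sorted_diameters 0).getD 0  -- sorted_diameters[0]; its IndexError (empty dict) is excluded by Pre_
    PySem.Dict.getD (PySem.Dict.mk (PySem.Dict.getD d closest [])) teeth_type 0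

-- ===== PORT B =====
-- the 'while lo < hi' bisect_right loop of Source B
-- structural fuel recursion (fuel := hi - lo always suffices: hi - lo shrinks by ≥ 1 each pass)
def pvBSearchGo (dia : Int) (keys : List Int) (lo hi : Nat) : Nat → Nat
  | 0 => lo
  | fuel + 1 =>
    if lo < hi then
      let mid := (lo + hi) / 2
      if dia < keys.getD mid 0 then pvBSearchGo dia keys lo mid fuel
      else pvBSearchGo dia keys (mid + 1) hi fuel
    else lo

def pvBSearch (dia : Int) (keys : List Int) (lo hi : Nat) : Nat :=
  pvBSearchGo dia keys lo hi (hi - lo)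

def get_teeth_for_diameter_py_alt (dia : Int) (teeth_type : String) (teeth_data : List (Int × List (String × Int))) : Int :=
  let d := PySem.Dict.mk teeth_data
  let keys := PySem.List.sorted (PySem.Dict.keys d) (fun x => x) false
  let lo := pvBSearch dia keys 0 keys.length
  let closest : Int :=
    if 0 < lo then keys.getD (lo - 1) 0
    else (PySem.List.pyGet? keys 0).getD 0  -- keys[0]; its IndexError (empty dict) is excluded by Pre_
  PySem.Dict.getD (PySem.Dict.mk (PySem.Dict.getD d closest [])) teeth_type 0

-- ===== PRECONDITION & SPEC =====
-- Pre_ excludes only the empty dict, on which Python A raises IndexError (B raises there too).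
def Pre_get_teeth_for_diameter_py (dia : Int) (teeth_type : String) (teeth_data : List (Int × List (String × Int))) : Prop := teeth_data ≠ []
instance (dia : Int) (teeth_type : String) (teeth_data : List (Int × List (String × Int))) : Decidable (Pre_get_teeth_for_diameter_py dia teeth_type teeth_data) := by unfold Pre_get_teeth_for_diameter_py; infer_instance

def pvWitness_get_teeth_for_diameter_py : Int × String × (List (Int × List (String × Int))) := (5, "t", [(3, [("t", 10)]), (7, [("t", 20)])])

def Spec_get_teeth_for_diameter_py (dia : Int) (teeth_type : String) (teeth_data : List (Int × List (String × Int))) (out : Int) : Prop := out = get_teeth_for_diameter_py_alt dia teeth_type teeth_data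
instance (dia : Int) (teeth_type : String) (teeth_data : List (Int × List (String × Int))) (out : Int) : Decidable (Spec_get_teeth_for_diameter_py dia teeth_type teeth_data out) := by unfold Spec_get_teeth_for_diameter_py; infer_instance

-- ===== CLAIM (what is proved, stated in full; the proofs are below) =====
def Claim_equal_get_teeth_for_diameter_py : Prop := ∀ (dia : Int) (teeth_type : String) (teeth_data : List (Int × List (String × Int))), Dom_get_teeth_for_diameter_py dia teeth_type teeth_data → Pre_get_teeth_for_diameter_py dia teeth_type teeth_data → Spec_get_teeth_for_diameter_py dia teeth_type teeth_data (get_teeth_for_diameter_py dia teeth_type teeth_data)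

-- ===== LEMMAS AND PROOFS =====

-- number of sorted keys ≤ dia (= the bisect_right insertion point on a sorted list)
def pvT (dia : Int) (ks : List Int) : Nat := (ks.takeWhile (fun x => !decide (dia < x))).length

theorem pvT_le (dia : Int) (ks : List Int) : pvT dia ks ≤ ks.length :=
  (List.takeWhile_prefix _).length_le

theorem lt_pvT (dia : Int) (ks : List Int) (i : Nat) (h : i < pvT dia ks) :
    ¬ dia < ks[i]'(Nat.lt_of_lt_of_le h (pvT_le dia ks)) := by
  have hmem : (ks.takeWhile (fun x => !decide (dia < x)))[i]'h ∈ ks.takeWhile (fun x => !decide (dia < x)) :=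
    List.getElem_mem _
  have hpx := List.mem_takeWhile_imp hmem
  have hget : (ks.takeWhile (fun x => !decide (dia < x)))[i]'h = ks[i]'(Nat.lt_of_lt_of_le h (pvT_le dia ks)) :=
    List.IsPrefix.getElem (List.takeWhile_prefix _) h
  rw [hget] at hpx
  simpa using hpx

theorem pvT_lt (dia : Int) (ks : List Int) (h : pvT dia ks < ks.length) :
    dia < ks.getD (pvT dia ks) 0 := by
  induction ks with
  | nil => simp [pvT] at h
  | cons a rest ih =>
    by_cases ha : dia < a
    · have h0 : pvT dia (a :: rest) = 0 := by simp [pvT, ha]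
      simpa [h0] using ha
    · have hT : pvT dia (a :: rest) = pvT dia rest + 1 := by
        simp [pvT, ha]
      rw [hT] at h ⊢
      simpa using ih (by simpa using h)

theorem aLoop_eq (dia : Int) (ks : List Int) (acc : Option Int) :
    pvALoop dia ks acc = ((ks.takeWhile (fun x => !decide (dia < x))).getLast?).or acc := by
  induction ks generalizing acc with
  | nil => simp [pvALoop]
  | cons a rest ih =>
    by_cases ha : dia < a
    · simp [pvALoop, ha]
    · rw [show pvALoop dia (a :: rest) acc = pvALoop dia rest (some a) by simp [pvALoop, ha]]
      rw [ih]
      have htw : (a :: rest).takeWhile (fun x => !decide (dia < x))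
          = a :: rest.takeWhile (fun x => !decide (dia < x)) := by
        simp [ha]
      rw [htw]
      cases hl : rest.takeWhile (fun x => !decide (dia < x)) with
      | nil => simp
      | cons b l' => simp [List.getLast?_cons]

theorem bsearch_eq (dia : Int) (ks : List Int)
    (hmono : ∀ (i j : Nat) (hi : i < ks.length) (hj : j < ks.length), i ≤ j → ks[i] ≤ ks[j]) :
    ∀ (n lo hi : Nat), hi - lo ≤ n → hi ≤ ks.length → lo ≤ pvT dia ks → pvT dia ks ≤ hi →
      pvBSearchGo dia ks lo hi n = pvT dia ks := by
  intro n
  induction n with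
  | zero =>
    intro lo hi hn hhi hlo hT
    rw [pvBSearchGo]
    omega
  | succ n ih =>
    intro lo hi hn hhi hlo hT
    by_cases hlh : lo < hi
    · rw [pvBSearchGo, if_pos hlh]
      show (if dia < ks.getD ((lo + hi) / 2) 0 then pvBSearchGo dia ks lo ((lo + hi) / 2) n
            else pvBSearchGo dia ks ((lo + hi) / 2 + 1) hi n) = pvT dia ks
      have hmid : (lo + hi) / 2 < ks.length := by omega
      rw [List.getD_eq_getElem ks 0 hmid]
      by_cases hcmp : dia < ks[(lo + hi) / 2]
      · rw [if_pos hcmp]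
        have hTmid : pvT dia ks ≤ (lo + hi) / 2 := by
          by_contra hc
          rw [Nat.not_le] at hc
          exact lt_pvT dia ks _ hc hcmp
        exact ih lo ((lo + hi) / 2) (by omega) (by omega) hlo hTmid
      · rw [if_neg hcmp]
        have hTmid : (lo + hi) / 2 < pvT dia ks := by
          by_contra hc
          rw [Nat.not_lt] at hc
          have h1 : pvT dia ks < ks.length := by omega
          have h2 := pvT_lt dia ks h1
          rw [List.getD_eq_getElem ks 0 h1] at h2
          have h3 := hmono (pvT dia ks) ((lo + hi) / 2) h1 hmid hc
          exact hcmp (lt_of_lt_of_le h2 h3)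
        exact ih ((lo + hi) / 2 + 1) hi (by omega) hhi (by omega) hT
    · rw [pvBSearchGo, if_neg hlh]
      omega

theorem main_eq (dia : Int) (teeth_type : String) (teeth_data : List (Int × List (String × Int))) :
    get_teeth_for_diameter_py dia teeth_type teeth_data
      = get_teeth_for_diameter_py_alt dia teeth_type teeth_data := by
  simp only [get_teeth_for_diameter_py, get_teeth_for_diameter_py_alt]
  set ks : List Int := PySem.List.sorted (PySem.Dict.keys (PySem.Dict.mk teeth_data)) (fun x => x) false with hks
  have hmono : ∀ (i j : Nat) (hi : i < ks.length) (hj : j < ks.length), i ≤ j → ks[i] ≤ ks[j] := by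
    intro i j hi hj hij
    exact PySem.List.sorted_id_getElem_mono (PySem.Dict.keys (PySem.Dict.mk teeth_data)) hij hj
  have hbs : pvBSearch dia ks 0 ks.length = pvT dia ks :=
    bsearch_eq dia ks hmono (ks.length - 0) 0 ks.length (by omega) le_rfl (Nat.zero_le _) (pvT_le dia ks)
  rw [hbs]
  by_cases hc : PySem.Dict.contains (PySem.Dict.mk teeth_data) dia
  · rw [if_pos hc]
    have hdia : dia ∈ ks := by
      rw [hks, PySem.List.mem_sorted]
      exact (PySem.Dict.contains_iff_mem_keys _ _).mp hc
    obtain ⟨i, hi, hksi⟩ := List.getElem_of_mem hdia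
    have hiT : i < pvT dia ks := by
      by_contra hcc
      rw [Nat.not_lt] at hcc
      have h1 : pvT dia ks < ks.length := Nat.lt_of_le_of_lt hcc hi
      have h2 := pvT_lt dia ks h1
      rw [List.getD_eq_getElem ks 0 h1] at h2
      have h3 := hmono (pvT dia ks) i h1 hi hcc
      rw [hksi] at h3
      exact absurd h3 (not_le.mpr h2)
    have hT0 : 0 < pvT dia ks := Nat.lt_of_le_of_lt (Nat.zero_le i) hiT
    have hT1 : pvT dia ks - 1 < ks.length := by have := pvT_le dia ks; omega
    have hle := lt_pvT dia ks (pvT dia ks - 1) (by omega)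
    have hge : dia ≤ ks[pvT dia ks - 1] := by
      have h4 := hmono i (pvT dia ks - 1) hi hT1 (by omega)
      rw [hksi] at h4
      exact h4
    have hclosest : (if 0 < pvT dia ks then ks.getD (pvT dia ks - 1) 0
        else (PySem.List.pyGet? ks 0).getD 0) = dia := by
      rw [if_pos hT0, List.getD_eq_getElem ks 0 hT1]
      exact le_antisymm (not_lt.mp hle) hge
    rw [hclosest]
  · rw [if_neg hc]
    rw [aLoop_eq]
    rcases Nat.eq_zero_or_pos (pvT dia ks) with hT0 | hT0
    · have htw : ks.takeWhile (fun x => !decide (dia < x)) = [] :=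
        List.length_eq_zero_iff.mp hT0
      rw [htw, if_neg (by omega)]
      rfl
    · have hT1 : pvT dia ks - 1 < ks.length := by have := pvT_le dia ks; omega
      have hlen : (ks.takeWhile (fun x => !decide (dia < x))).length = pvT dia ks := rfl
      have hlast : (ks.takeWhile (fun x => !decide (dia < x))).getLast? = some (ks[pvT dia ks - 1]) := by
        rw [List.getLast?_eq_getElem?, hlen]
        rw [List.getElem?_eq_getElem (by rw [hlen]; omega)]
        exact congrArg some (List.IsPrefix.getElem (List.takeWhile_prefix _) _)
      rw [hlast, if_pos hT0, List.getD_eq_getElem ks 0 hT1]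
      rfl

-- ===== VERDICT (by name: the statement is the Claim_ definition above) =====
theorem get_teeth_for_diameter_py_spec : Claim_equal_get_teeth_for_diameter_py := by
  intro dia teeth_type teeth_data _ _
  exact main_eq dia teeth_type teeth_data
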